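-- pv_equiv track=rewrite | github.com/MrBrantCode/unitest_baseline | mut_generate/mist_train_taco/taco_5584/solution.py | generate_lexicographic_combinations
-- ===== SOURCE A (Python) =====
-- def generate_lexicographic_combinations(S: str, N: int) -> list:
--     # Helper function to generate all combinations
--     def generate_combinations(x: str):
--         return [[y for (j, y) in enumerate(set(x)) if i >> j & 1] for i in range(2 ** len(set(x)))]
--
--     # Generate all combinations of characters from S
--     combinations = generate_combinations(S)
--
--     # Sort each combination internally
--     for combination in combinations:
--         combination.sort()
--
--     # Sort the list of combinations lexicographically
--     combinations.sort()
--
--     # Convert each combination list to a string and filter out empty combinations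
--     result = []
--     for combination in combinations[1:]:
--         result.append(''.join(combination))
--
--     return result
-- ===== SOURCE B (Python) =====
-- def generate_lexicographic_combinations(S: str, N: int) -> list:
--     # DFS over the sorted distinct characters: emits every nonempty subset
--     # directly in lexicographic order, no post-sorting needed.
--     chars = sorted(set(S))
--
--     def dfs(prefix, rest):
--         if not rest:
--             return []
--         c, tail = rest[0], rest[1:]
--         cur = prefix + c
--         return [cur] + dfs(cur, tail) + dfs(prefix, tail)
--
--     return dfs('', chars)
-- ===== Notes on version B (the rewrite author's own statement) =====
-- stated objective: faster
-- what changed: Replaces the bitmask enumeration of all 2^k subsets followed by per-subset sorts and a global lexicographic sort with a DFS over the sorted distinct characters that emits the nonempty subsets already in lexicographic order.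
import Mathlib
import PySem

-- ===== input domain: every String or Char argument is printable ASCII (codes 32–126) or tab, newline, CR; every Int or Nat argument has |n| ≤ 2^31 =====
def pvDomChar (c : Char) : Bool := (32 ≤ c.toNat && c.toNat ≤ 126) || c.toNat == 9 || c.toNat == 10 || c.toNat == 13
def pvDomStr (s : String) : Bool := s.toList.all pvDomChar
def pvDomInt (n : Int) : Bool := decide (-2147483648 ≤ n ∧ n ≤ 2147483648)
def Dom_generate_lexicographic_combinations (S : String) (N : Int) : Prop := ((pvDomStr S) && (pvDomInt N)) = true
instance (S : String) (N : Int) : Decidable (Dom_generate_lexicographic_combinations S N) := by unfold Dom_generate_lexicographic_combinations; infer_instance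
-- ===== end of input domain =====

-- B replaces the 2^k bitmask enumeration + per-subset sorts + global sort by a DFS over the
-- sorted distinct characters that emits the nonempty subsets already in lexicographic order.

-- ===== PORT A =====
-- Python iterates enumerate(set(x)); the set's hash iteration order is not modelled, but A's
-- result is independent of it (each combination and the whole list are sorted before use), so
-- the port iterates the set in PySem.Set order. enumerate indices are ≥ 0, so .toNat is exact;
-- Python's truthiness of `i >> j & 1` is `≠ 0`; ''.join over 1-char strings is Chars.join [].
def generate_lexicographic_combinations (S : String) (N : Int) : List String :=
  let distinct : List Char := PySem.Set.ofList S.toList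
  let combinations : List (List Char) :=
    (PySem.List.pyRange 0 ((2 : Int) ^ distinct.length)).map (fun i =>
      (PySem.List.enumerate distinct).filterMap (fun jy =>
        if PySem.Int.band (i >>> jy.1.toNat) 1 ≠ 0 then some jy.2 else none))
  -- for combination in combinations: combination.sort()
  let combinations := combinations.map (fun c => PySem.List.sorted c (fun y => y))
  -- combinations.sort()
  let combinations := PySem.List.sorted combinations (fun c => c)
  -- result loop over combinations[1:], appending ''.join(combination)
  (PySem.List.slice combinations (some 1) none).map
    (fun c => String.ofList (PySem.Chars.join [] (c.map (fun y => [y]))))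

-- ===== PORT B =====
-- dfs(prefix, rest): emit prefix+rest[0], recurse with it into rest[1:], then without it.
def pvBDfs (pre : List Char) : List Char → List String
  | [] => []
  | c :: tail =>
      let cur := pre ++ [c]
      String.ofList cur :: (pvBDfs cur tail ++ pvBDfs pre tail)

def generate_lexicographic_combinations_alt (S : String) (N : Int) : List String :=
  let chars : List Char := PySem.List.sorted (PySem.Set.ofList S.toList) (fun y => y)
  pvBDfs [] chars

-- ===== PRECONDITION & SPEC =====
def Spec_generate_lexicographic_combinations (S : String) (N : Int) (out : List String) : Prop := out = generate_lexicographic_combinations_alt S N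
instance (S : String) (N : Int) (out : List String) : Decidable (Spec_generate_lexicographic_combinations S N out) := by unfold Spec_generate_lexicographic_combinations; infer_instance

-- ===== CLAIM (what is proved, stated in full; the proofs are below) =====
def Claim_equal_generate_lexicographic_combinations : Prop := ∀ (S : String) (N : Int), Dom_generate_lexicographic_combinations S N → Spec_generate_lexicographic_combinations S N (generate_lexicographic_combinations S N)

-- ===== LEMMAS AND PROOFS =====

-- char-list form of B's DFS
def pvBd (pre : List Char) : List Char → List (List Char)
  | [] => []
  | c :: tail => (pre ++ [c]) :: (pvBd (pre ++ [c]) tail ++ pvBd pre tail)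

theorem pvBDfs_eq_map_mk (pre : List Char) (l : List Char) :
    pvBDfs pre l = (pvBd pre l).map String.ofList := by
  induction l generalizing pre with
  | nil => rfl
  | cons c tail ih => simp [pvBDfs, pvBd, ih]

theorem pvBd_eq_map_append (pre : List Char) (l : List Char) :
    pvBd pre l = (pvBd [] l).map (pre ++ ·) := by
  induction l generalizing pre with
  | nil => rfl
  | cons c tail ih =>
      rw [pvBd, pvBd, ih (pre ++ [c]), ih pre]
      simp only [List.nil_append]
      rw [ih [c]]
      simp [List.map_map, Function.comp_def]

-- the DFS output (with [] in front) is a permutation of sublists'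
theorem pvBd_perm_sublists' (l : List Char) :
    ([] :: pvBd [] l).Perm l.sublists' := by
  induction l with
  | nil => simp [pvBd]
  | cons c tail ih =>
      rw [pvBd, List.sublists'_cons]
      simp only [List.nil_append]
      rw [pvBd_eq_map_append [c] tail]
      refine List.Perm.trans ?_ (ih.append (ih.map (List.cons c)))
      have h : (([c] :: List.map (fun x => [c] ++ x) (pvBd [] tail)) ++ pvBd [] tail).Perm
          (pvBd [] tail ++ ([c] :: List.map (fun x => [c] ++ x) (pvBd [] tail))) :=
        List.perm_append_comm
      refine List.Perm.trans ?_ ((h.cons []).trans ?_)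
      · simp
      · simp [List.cons_append]

-- shape of DFS output entries
theorem pvBd_shape (l : List Char) :
    ∀ m ∈ pvBd [] l, ∃ h t, m = h :: t ∧ h ∈ l := by
  induction l with
  | nil => simp [pvBd]
  | cons c tail ih =>
      rw [pvBd]
      simp only [List.nil_append]
      rw [pvBd_eq_map_append [c] tail]
      intro m hm
      rcases List.mem_cons.mp hm with h | h
      · exact ⟨c, [], h, List.mem_cons_self⟩
      · rcases List.mem_append.mp h with h | h
        · rcases List.mem_map.mp h with ⟨x, _, rfl⟩
          exact ⟨c, x, rfl, List.mem_cons_self⟩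
        · rcases ih m h with ⟨hd, t, rfl, hmem⟩
          exact ⟨hd, t, rfl, List.mem_cons_of_mem _ hmem⟩

-- DFS output is strictly increasing in list-lex order
theorem pvBd_pairwise (l : List Char) (hl : l.Pairwise (· < ·)) :
    (pvBd [] l).Pairwise (· < ·) := by
  induction l with
  | nil => simp [pvBd]
  | cons c tail ih =>
      rcases List.pairwise_cons.mp hl with ⟨hc, ht⟩
      rw [pvBd]
      simp only [List.nil_append]
      rw [pvBd_eq_map_append [c] tail]
      refine List.pairwise_cons.mpr ⟨?_, List.pairwise_append.mpr ⟨?_, ih ht, ?_⟩⟩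
      · intro m hm
        rcases List.mem_append.mp hm with h | h
        · rcases List.mem_map.mp h with ⟨x, hx, rfl⟩
          rcases pvBd_shape tail x hx with ⟨hd, t, rfl, _⟩
          exact List.cons_lt_cons_self.mpr (List.nil_lt_cons _ _)
        · rcases pvBd_shape tail m h with ⟨hd, t, rfl, hmem⟩
          exact List.Lex.rel (hc hd hmem)
      · refine List.Pairwise.map _ (fun x y hxy => ?_) (ih ht)
        exact List.cons_lt_cons_self.mpr hxy
      · intro a ha b hb
        rcases List.mem_map.mp ha with ⟨x, _, rfl⟩
        rcases pvBd_shape tail b hb with ⟨hd, t, rfl, hmem⟩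
        exact List.Lex.rel (hc hd hmem)

-- the bitmask row, written as structural recursion on the distinct list
def pvMask (n : Nat) : List Char → List Char
  | [] => []
  | d :: t => if n % 2 = 1 then d :: pvMask (n / 2) t else pvMask (n / 2) t

theorem pvFilterMap_enumerate (D : List Char) (s n : Nat) :
    (PySem.List.enumerate D (s : Int)).filterMap (fun jy =>
        if PySem.Int.band (HShiftRight.hShiftRight (α := ℤ) (β := ℕ) ((n : Int)) jy.1.toNat) 1 ≠ 0
        then some jy.2 else none)
      = pvMask (n >>> s) D := by
  induction D generalizing s with
  | nil => rfl
  | cons d t ih =>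
      have hcast : ((s : Int)) + 1 = (((s + 1 : Nat)) : Int) := by push_cast; ring
      have hcond : (PySem.Int.band
            (HShiftRight.hShiftRight (α := ℤ) (β := ℕ) ((n : Int)) (((s : Int)).toNat)) 1 ≠ 0)
          ↔ ((n >>> s) % 2 = 1) := by
        simp only [Int.toNat_natCast, PySem.Int.band_one]
        rw [show (HShiftRight.hShiftRight (α := ℤ) (β := ℕ) ((n : Int)) s) = ((n >>> s : Nat) : Int) by simp,
            show (2 : Int) = ((2 : Nat) : Int) by norm_num, PySem.Int.mod_natCast]
        omega
      rw [PySem.List.enumerate]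
      simp only [List.filterMap_cons, hcast, ih (s + 1), Nat.shiftRight_succ]
      rw [pvMask]
      by_cases hpar : (n >>> s) % 2 = 1
      · rw [if_pos (hcond.mpr hpar), if_pos hpar]
      · rw [if_neg (fun hc => hpar (hcond.mp hc)), if_neg hpar]

theorem pvMap_range_two_mul {α : Type} (f : Nat → α) (m : Nat) :
    ((List.range (2 * m)).map f).Perm
      ((List.range m).map (fun a => f (2 * a)) ++ (List.range m).map (fun a => f (2 * a + 1))) := by
  induction m with
  | zero => simp
  | succ m ih =>
      have h2 : 2 * (m + 1) = (2 * m + 1) + 1 := by ring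
      rw [h2, List.range_succ, List.range_succ, List.range_succ]
      simp only [List.map_append, List.map_cons, List.map_nil]
      refine List.Perm.trans ((ih.append_right _).append_right _) ?_
      simp only [List.append_assoc]
      refine List.Perm.append_left _ ?_
      simp

theorem pvMask_perm_sublists' (D : List Char) :
    ((List.range (2 ^ D.length)).map (fun n => pvMask n D)).Perm D.sublists' := by
  induction D with
  | nil => simp [pvMask]
  | cons d t ih =>
      have hlen : 2 ^ (d :: t).length = 2 * 2 ^ t.length := by
        simp [List.length_cons, pow_succ]; ring
      rw [hlen, List.sublists'_cons]
      refine List.Perm.trans (pvMap_range_two_mul _ _) ?_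
      have he : (List.range (2 ^ t.length)).map (fun a => pvMask (2 * a) (d :: t))
          = (List.range (2 ^ t.length)).map (fun a => pvMask a t) := by
        refine List.map_congr_left (fun a _ => ?_)
        rw [pvMask]
        have h1 : (2 * a) % 2 = 0 := by omega
        have h2 : (2 * a) / 2 = a := by omega
        simp [h1, h2]
      have ho : (List.range (2 ^ t.length)).map (fun a => pvMask (2 * a + 1) (d :: t))
          = ((List.range (2 ^ t.length)).map (fun a => pvMask a t)).map (List.cons d) := by
        rw [List.map_map]
        refine List.map_congr_left (fun a _ => ?_)
        rw [pvMask]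
        have h1 : (2 * a + 1) % 2 = 1 := by omega
        have h2 : (2 * a + 1) / 2 = a := by omega
        simp [h1, h2]
      rw [he, ho]
      exact ih.append (ih.map _)

-- sorting a char list only depends on the multiset
theorem pvMsort_congr {l l' : List Char} (h : l.Perm l') :
    PySem.List.sorted l (fun y => y) = PySem.List.sorted l' (fun y => y) :=
  PySem.List.sorted_eq_sorted_of_perm l l' _ (fun _ _ h => h) h

def pvMsort (c : List Char) : List Char := PySem.List.sorted c (fun y => y)

theorem pvMsort_cons_msort (x : Char) (c : List Char) :
    pvMsort (x :: c) = pvMsort (x :: pvMsort c) :=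
  pvMsort_congr ((PySem.List.sorted_perm c _ _).symm.cons x)

theorem pvMap_msort_cons {x : Char} (Q : List (List Char)) :
    (Q.map (List.cons x)).map pvMsort = (Q.map pvMsort).map (fun c => pvMsort (x :: c)) := by
  rw [List.map_map, List.map_map]
  exact List.map_congr_left fun c _ => pvMsort_cons_msort x c

theorem pvMapSort_sublists'_perm {D D' : List Char} (h : D.Perm D') :
    (D.sublists'.map pvMsort).Perm (D'.sublists'.map pvMsort) := by
  induction h with
  | nil => simp
  | cons x h ih =>
      simp only [List.sublists'_cons, List.map_append]
      refine ih.append ?_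
      rw [pvMap_msort_cons, pvMap_msort_cons]
      exact ih.map _
  | swap x y l =>
      simp only [List.sublists'_cons, List.map_append, List.append_assoc, List.map_map]
      have h4 : l.sublists'.map (pvMsort ∘ List.cons y ∘ List.cons x)
          = l.sublists'.map (pvMsort ∘ List.cons x ∘ List.cons y) := by
        refine List.map_congr_left fun c _ => ?_
        exact pvMsort_congr (List.Perm.swap x y c)
      rw [h4]
      exact List.Perm.append_left _ (List.perm_append_comm_assoc _ _ _)
  | trans _ _ ih1 ih2 => exact ih1.trans ih2

theorem pvMapSort_sublists'_sorted (L : List Char) (hL : L.Pairwise (· < ·)) :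
    L.sublists'.map pvMsort = L.sublists' := by
  have h : ∀ c ∈ L.sublists', pvMsort c = c := fun c hc =>
    PySem.List.sorted_eq_self_of_pairwise c _
      ((List.Pairwise.sublist (List.mem_sublists'.mp hc) hL).imp le_of_lt)
  calc L.sublists'.map pvMsort = L.sublists'.map id := List.map_congr_left h
    _ = L.sublists' := List.map_id _

-- ===== VERDICT (by name: the statement is the Claim_ definition above) =====
theorem pvSorted_outer_eq (D : List Char) (hnd : D.Nodup) :
    PySem.List.sorted
        (((PySem.List.pyRange 0 ((2 : Int) ^ D.length)).map
            (fun i => (PySem.List.enumerate D).filterMap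
              (fun jy => if PySem.Int.band (i >>> jy.1.toNat) 1 ≠ 0 then some jy.2 else none))).map
          (fun c => PySem.List.sorted c (fun y => y)))
        (fun c => c)
      = [] :: pvBd [] (PySem.List.sorted D (fun y => y)) := by
  have hmaskeq : (PySem.List.pyRange 0 ((2 : Int) ^ D.length)).map
        (fun i => (PySem.List.enumerate D).filterMap
          (fun jy => if PySem.Int.band (i >>> jy.1.toNat) 1 ≠ 0 then some jy.2 else none))
      = (List.range (2 ^ D.length)).map (fun n => pvMask n D) := by
    rw [show ((2 : Int) ^ D.length) = ((2 ^ D.length : Nat) : Int) by push_cast; ring,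
        PySem.List.pyRange_zero_natCast, List.map_map]
    refine List.map_congr_left fun n _ => ?_
    have h := pvFilterMap_enumerate D 0 n
    simpa only [Function.comp_apply, Nat.cast_zero, Nat.shiftRight_zero] using h
  rw [hmaskeq, show (fun c : List Char => PySem.List.sorted c (fun y => y)) = pvMsort from rfl]
  have hL : (PySem.List.sorted D (fun y => y)).Pairwise (· < ·) := by
    have hle : (PySem.List.sorted D (fun y => y)).Pairwise (· ≤ ·) :=
      PySem.List.sorted_pairwise D (fun y => y)
    have hne : (PySem.List.sorted D (fun y => y)).Nodup :=
      ((PySem.List.sorted_perm D (fun y => y) false).nodup_iff).mpr hnd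
    exact (hle.and hne).imp fun h => lt_of_le_of_ne h.1 h.2
  have h1 : (([] : List Char) :: pvBd [] (PySem.List.sorted D (fun y => y))).Perm
      ((PySem.List.sorted D (fun y => y)).sublists'.map pvMsort) := by
    rw [pvMapSort_sublists'_sorted _ hL]
    exact pvBd_perm_sublists' _
  have h3 := pvMapSort_sublists'_perm (PySem.List.sorted_perm D (fun y => y) false)
  have h4 := ((pvMask_perm_sublists' D).map pvMsort).symm
  have hpw : (([] : List Char) :: pvBd [] (PySem.List.sorted D (fun y => y))).Pairwise (· < ·) := by
    refine List.pairwise_cons.mpr ⟨fun m hm => ?_, pvBd_pairwise _ hL⟩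
    rcases pvBd_shape _ m hm with ⟨hd, t, rfl, _⟩
    exact List.nil_lt_cons _ _
  have hmain := PySem.List.sorted_eq_of_perm_of_pairwise_lt _ _ (fun c : List Char => c)
    ((h1.trans h3).trans h4) hpw
  convert hmain using 2

theorem generate_lexicographic_combinations_spec : Claim_equal_generate_lexicographic_combinations := by
  intro S N _
  unfold Spec_generate_lexicographic_combinations
  unfold generate_lexicographic_combinations generate_lexicographic_combinations_alt
  simp only []
  rw [pvSorted_outer_eq (PySem.Set.ofList S.toList) (PySem.Set.nodup_ofList S.toList)]
  rw [PySem.List.slice_from _ (by norm_num : (0:Int) ≤ 1)]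
  simp only [Int.toNat_one, List.drop_one, List.tail_cons]
  rw [pvBDfs_eq_map_mk]
  refine List.map_congr_left fun c _ => ?_
  rw [PySem.Chars.join_nil_singletons]
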